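-- pv_equiv track=rewrite | github.com/yellowdalbie/KICEsentences | phase_A_registry_builder.py | assign_atom_ids
-- ===== SOURCE A (Python) =====
-- from collections import defaultdict
--
-- CONCEPT_PREFIX = {
--     '9수':     'MID',
--     '10공수1': 'CM1',
--     '10공수2': 'CM2',
--     '12대수':  'ALG',
--     '12미적Ⅰ': 'CA1',
--     '12확통':  'STA',
-- }
--
-- def concept_to_prefix(concept_id):
--     for prefix, code in CONCEPT_PREFIX.items():
--         if concept_id.startswith(prefix):
--             return code
--     return 'ETC'
--
-- def assign_atom_ids(entries):
--     """concept_id별로 순번을 매겨 atom_id를 부여한다."""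
--     counter = defaultdict(int)
--     result  = []
--
--     # concept_id 순서대로 정렬 후 번호 부여
--     sorted_entries = sorted(entries, key=lambda x: x['concept_id'])
--
--     for e in sorted_entries:
--         prefix = concept_to_prefix(e['concept_id'])
--         counter[e['concept_id']] += 1
--         atom_id = f"{prefix}-{counter[e['concept_id']]:03d}"
--         result.append({**e, 'atom_id': atom_id})
--
--     return result
-- ===== SOURCE B (Python) =====
-- from itertools import groupby
--
-- CONCEPT_PREFIX = {
--     '9수':     'MID',
--     '10공수1': 'CM1',
--     '10공수2': 'CM2',
--     '12대수':  'ALG',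
--     '12미적Ⅰ': 'CA1',
--     '12확통':  'STA',
-- }
--
-- def concept_to_prefix(concept_id):
--     return next((code for prefix, code in CONCEPT_PREFIX.items()
--                  if concept_id.startswith(prefix)), 'ETC')
--
-- def assign_atom_ids(entries):
--     """concept_id별로 순번을 매겨 atom_id를 부여한다."""
--     key = lambda e: e['concept_id']
--     result = []
--     for cid, group in groupby(sorted(entries, key=key), key=key):
--         prefix = concept_to_prefix(cid)
--         for i, e in enumerate(group, start=1):
--             result.append({**e, 'atom_id': f'{prefix}-{i:03d}'})
--     return result
-- ===== Notes on version B (the rewrite author's own statement) =====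
-- stated objective: alternative
-- what changed: Replaced the global defaultdict counter threaded through a flat loop with itertools.groupby over the sorted list: each concept group is numbered locally by enumerate(group, start=1) with the prefix computed once per group.
import Mathlib
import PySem

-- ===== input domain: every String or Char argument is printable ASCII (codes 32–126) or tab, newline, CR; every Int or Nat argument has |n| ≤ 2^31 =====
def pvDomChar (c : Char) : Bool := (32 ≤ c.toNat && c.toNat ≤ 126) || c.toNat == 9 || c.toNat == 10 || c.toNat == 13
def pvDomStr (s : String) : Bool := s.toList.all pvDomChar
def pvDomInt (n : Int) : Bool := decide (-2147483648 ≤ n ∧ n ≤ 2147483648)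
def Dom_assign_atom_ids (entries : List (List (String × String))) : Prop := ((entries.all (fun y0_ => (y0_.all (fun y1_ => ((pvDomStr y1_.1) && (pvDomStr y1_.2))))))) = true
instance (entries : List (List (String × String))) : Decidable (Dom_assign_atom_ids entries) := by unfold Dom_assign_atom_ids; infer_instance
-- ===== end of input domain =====

-- B replaces A's global defaultdict counter and flat loop with groupby on the sorted list
-- plus per-group enumerate (objective: alternative decomposition, same asymptotic cost).

-- ===== PORT A =====

-- CONCEPT_PREFIX (module constant; dict literal as an association list)
def CONCEPT_PREFIX : List (String × String) :=
  [("9수", "MID"), ("10공수1", "CM1"), ("10공수2", "CM2"),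
   ("12대수", "ALG"), ("12미적Ⅰ", "CA1"), ("12확통", "STA")]

-- 'for prefix, code in CONCEPT_PREFIX.items(): if concept_id.startswith(prefix): return code'
def conceptToPrefixLoop (concept_id : String) : List (String × String) → String
  | [] => "ETC"
  | (pre, code) :: rest =>
      if PySem.Str.startswith concept_id pre then code else conceptToPrefixLoop concept_id rest

def concept_to_prefix (concept_id : String) : String :=
  conceptToPrefixLoop concept_id CONCEPT_PREFIX

-- e['concept_id']: under Pre_ the key is present, so getD's default is never read
def entryKey (e : List (String × String)) : String :=
  (PySem.Dict.mk e).getD "concept_id" ""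

-- f"{prefix}-{n:03d}" for n ≥ 1 (zero-pad to width 3; exact via str(n).zfill(3))
def atomIdStr (pre : String) (n : Int) : String :=
  pre ++ "-" ++ PySem.Str.zfill (PySem.Int.toStr n) 3

-- {**e, 'atom_id': s}
def withAtomId (e : List (String × String)) (s : String) : List (String × String) :=
  ((PySem.Dict.mk e).insert "atom_id" s).items

-- the body of A's for-loop: state = (counter, result)
def stepA (st : PySem.Dict String Int × List (List (String × String)))
    (e : List (String × String)) : PySem.Dict String Int × List (List (String × String)) :=
  let cid := entryKey e
  let pre := concept_to_prefix cid
  let counter := st.1.modify cid 0 (· + 1)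
  let atom_id := atomIdStr pre (counter.getD cid 0)
  (counter, st.2 ++ [withAtomId e atom_id])

def assign_atom_ids (entries : List (List (String × String))) : List (List (String × String)) :=
  let sorted_entries := PySem.List.sorted entries entryKey false
  (sorted_entries.foldl stepA (PySem.Dict.empty, [])).2

-- ===== PORT B =====

-- itertools.groupby(xs, key): runs of consecutive elements with equal key
def pyGroupby (key : α → String) : List α → List (String × List α)
  | [] => []
  | x :: xs =>
      let k := key x
      (k, x :: xs.takeWhile (fun y => key y == k)) ::
        pyGroupby key (xs.dropWhile (fun y => key y == k))
termination_by l => l.length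
decreasing_by
  simpa using Nat.lt_succ_of_le (List.length_dropWhile_le _ _)

def assign_atom_ids_alt (entries : List (List (String × String))) : List (List (String × String)) :=
  (pyGroupby entryKey (PySem.List.sorted entries entryKey false)).flatMap
    (fun g =>
      let pre := concept_to_prefix g.1
      (PySem.List.enumerate g.2 1).map (fun ie => withAtomId ie.2 (atomIdStr pre ie.1)))

-- ===== PRECONDITION & SPEC =====

-- Pre_ excludes entries missing the 'concept_id' key, on which A raises KeyError, and
-- entries with duplicate keys, which cannot arise from a Python dict (the association-list
-- model of such an input is accidental).
def Pre_assign_atom_ids (entries : List (List (String × String))) : Prop :=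
  ∀ e ∈ entries, (e.map Prod.fst).Nodup ∧ "concept_id" ∈ e.map Prod.fst
instance (entries : List (List (String × String))) : Decidable (Pre_assign_atom_ids entries) := by
  unfold Pre_assign_atom_ids; infer_instance

def pvWitness_assign_atom_ids : (List (List (String × String))) :=
  [[("concept_id", "alg1"), ("text", "x")], [("concept_id", "alg1")], [("concept_id", "b")]]

def Spec_assign_atom_ids (entries : List (List (String × String))) (out : List (List (String × String))) : Prop := out = assign_atom_ids_alt entries
instance (entries : List (List (String × String))) (out : List (List (String × String))) : Decidable (Spec_assign_atom_ids entries out) := by unfold Spec_assign_atom_ids; infer_instance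

-- ===== CLAIM (what is proved, stated in full; the proofs are below) =====
def Claim_equal_assign_atom_ids : Prop := ∀ (entries : List (List (String × String))), Dom_assign_atom_ids entries → Pre_assign_atom_ids entries → Spec_assign_atom_ids entries (assign_atom_ids entries)

-- ===== LEMMAS AND PROOFS =====


-- for all y in a takeWhile, the predicate holds (A-side run)
theorem key_ne_of_mem_dropWhile (k : String) (xs : List (List (String × String)))
    (hp : xs.Pairwise (fun a b => entryKey a ≤ entryKey b))
    (hk : ∀ y ∈ xs, k ≤ entryKey y) :
    ∀ e ∈ xs.dropWhile (fun y => entryKey y == k), entryKey e ≠ k := by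
  induction xs with
  | nil => simp
  | cons x xs ih =>
    rw [List.dropWhile_cons]
    by_cases hx : entryKey x = k
    · simp only [hx, beq_self_eq_true, if_true]
      exact ih hp.tail (fun y hy => hk y (List.mem_cons_of_mem _ hy))
    · simp only [beq_iff_eq, hx, if_false]
      intro e he
      rcases List.mem_cons.1 he with rfl | he
      · exact hx
      · have h1 : k ≤ entryKey x := hk x (List.mem_cons_self)
        have h2 : entryKey x ≤ entryKey e := (List.pairwise_cons.1 hp).1 e he
        intro hek
        exact hx (le_antisymm (hek ▸ h2) h1)

-- A's loop over a run of entries that all share the key cid, starting from a counter whose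
-- cid count is n: the counter advances by the run's length and the outputs are the
-- enumerate-numbered entries n+1, n+2, …
theorem foldl_stepA_run (cid : String) (g : List (List (String × String)))
    (hg : ∀ e ∈ g, entryKey e = cid)
    (c : PySem.Dict String Int) (r : List (List (String × String))) (n : Int)
    (hc : c.getD cid 0 = n) :
    g.foldl stepA (c, r) =
      (g.foldl (fun d e => d.modify (entryKey e) 0 (· + 1)) c,
       r ++ (PySem.List.enumerate g (n + 1)).map
              (fun ie => withAtomId ie.2 (atomIdStr (concept_to_prefix cid) ie.1))) := by
  induction g generalizing c r n with
  | nil => simp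
  | cons e g ih =>
    have hcid : entryKey e = cid := hg e List.mem_cons_self
    have hstep : stepA (c, r) e =
        (c.modify cid 0 (· + 1),
         r ++ [withAtomId e (atomIdStr (concept_to_prefix cid) (n + 1))]) := by
      simp [stepA, hcid, PySem.Dict.getD_modify_self, hc]
    rw [List.foldl_cons, hstep,
        ih (fun y hy => hg y (List.mem_cons_of_mem _ hy)) _ _ (n + 1)
          (by rw [PySem.Dict.getD_modify_self, hc])]
    simp only [PySem.List.enumerate_cons, List.map_cons, List.append_assoc, List.cons_append,
      List.nil_append]
    rw [List.foldl_cons, hcid]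

theorem main_lemma (s : List (List (String × String)))
    (hs : s.Pairwise (fun a b => entryKey a ≤ entryKey b))
    (c : PySem.Dict String Int) (r : List (List (String × String)))
    (hc : ∀ e ∈ s, c.getD (entryKey e) 0 = 0) :
    (s.foldl stepA (c, r)).2 =
      r ++ (pyGroupby entryKey s).flatMap
        (fun g =>
          (PySem.List.enumerate g.2 1).map
            (fun ie => withAtomId ie.2 (atomIdStr (concept_to_prefix g.1) ie.1))) := by
  induction s using pyGroupby.induct entryKey generalizing c r with
  | case1 => simp [pyGroupby]
  | case2 x xs k ih =>
    have hg : ∀ e ∈ x :: xs.takeWhile (fun y => entryKey y == k), entryKey e = k := by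
      intro e he
      rcases List.mem_cons.1 he with rfl | he
      · rfl
      · exact beq_iff_eq.1 (List.mem_takeWhile_imp (l := xs) (p := fun y => entryKey y == k) he)
    have hk0 : c.getD k 0 = 0 := hc x List.mem_cons_self
    have hsplit : x :: xs =
        (x :: xs.takeWhile (fun y => entryKey y == k)) ++
          xs.dropWhile (fun y => entryKey y == k) := by
      simp
    rw [hsplit, List.foldl_append, foldl_stepA_run k _ hg c r 0 hk0]
    have hkle : ∀ y ∈ xs, k ≤ entryKey y := fun y hy => (List.pairwise_cons.1 hs).1 y hy
    have hne := key_ne_of_mem_dropWhile k xs hs.tail hkle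
    have hc' : ∀ e ∈ xs.dropWhile (fun y => entryKey y == k),
        ((x :: xs.takeWhile (fun y => entryKey y == k)).foldl
          (fun d e => d.modify (entryKey e) 0 (· + 1)) c).getD (entryKey e) 0 = 0 := by
      intro e he
      rw [← List.foldl_map (f := entryKey) (g := fun d v => PySem.Dict.modify d v 0 (· + 1)),
          PySem.Dict.getD_foldl_modify_add_one]
      have h1 : c.getD (entryKey e) 0 = 0 :=
        hc e (List.mem_cons_of_mem _ ((List.dropWhile_sublist _).subset he))
      have h2 : ((x :: xs.takeWhile (fun y => entryKey y == k)).map entryKey).count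
          (entryKey e) = 0 := by
        rw [List.count_eq_zero]
        intro hmem
        rcases List.mem_map.1 hmem with ⟨y, hy, hye⟩
        exact hne e he (hye.symm.trans (hg y hy))
      rw [h1, h2]
      simp
    rw [ih (List.Pairwise.sublist (List.dropWhile_sublist _) hs.tail) _ _ hc']
    conv_rhs => rw [pyGroupby.eq_def]
    simp [List.append_assoc, PySem.List.enumerate_cons]
    exact ⟨rfl, rfl⟩

-- ===== VERDICT (by name: the statement is the Claim_ definition above) =====
theorem assign_atom_ids_spec : Claim_equal_assign_atom_ids := by
  intro entries _ _
  unfold Spec_assign_atom_ids assign_atom_ids assign_atom_ids_alt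
  have hs := PySem.List.sorted_pairwise entries entryKey
  rw [main_lemma _ hs _ _ (fun e _ => by simp [PySem.Dict.getD_empty])]
  simp
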